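-- pv_equiv track=rewrite | github.com/polkerty/chesster | chester/rhythm_pipeline.py | _perplexity_segments
-- ===== SOURCE A (Python) =====
-- from typing import Any, Dict, List, Optional
--
-- def _sign_bucket(cp: int) -> int:
--     if cp > 0:
--         return 1
--     if cp < 0:
--         return -1
--     return 0
--
-- def _perplexity_segments(cps_by_depth: List[int]) -> int:
--     """
--     Count #segments in sign sequence across depths.
--     Example: W,W,W,B,W => 3
--     """
--     signs = [_sign_bucket(cp) for cp in cps_by_depth]
--
--     # Carry forward last non-zero across zeros
--     norm: List[int] = []
--     last = 0
--     for s in signs: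
--         if s == 0:
--             norm.append(last)
--         else:
--             norm.append(s)
--             last = s
--
--     if all(s == 0 for s in norm):
--         return 1
--
--     seg = 0
--     prev: Optional[int] = None
--     for s in norm:
--         if s == 0:
--             continue
--         if prev is None or s != prev:
--             seg += 1
--             prev = s
--     return max(1, seg)
-- ===== SOURCE B (Python) =====
-- from typing import List
--
--
-- def _perplexity_segments(cps_by_depth: List[int]) -> int:
--     # A segment boundary is exactly a sign crossing between consecutive
--     # non-zero evaluations, i.e. an adjacent pair with negative product.
--     # So: drop zeros, then answer = 1 + number of negative-product pairs
--     # (1 covers the initial segment; empty/all-zero inputs give 1).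
--     nz = [cp for cp in cps_by_depth if cp != 0]
--     return 1 + sum(x * y < 0 for x, y in zip(nz, nz[1:]))
-- ===== Notes on version B (the rewrite author's own statement) =====
-- stated objective: idiomatic
-- what changed: Replaced A's sign-bucketing, carry-forward normalisation pass and stateful prev/None segment scan by a purely arithmetic formulation: filter out zeros and return 1 plus the number of adjacent pairs with negative product (sign crossings); no sign buckets or run state at all.
import Mathlib
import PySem

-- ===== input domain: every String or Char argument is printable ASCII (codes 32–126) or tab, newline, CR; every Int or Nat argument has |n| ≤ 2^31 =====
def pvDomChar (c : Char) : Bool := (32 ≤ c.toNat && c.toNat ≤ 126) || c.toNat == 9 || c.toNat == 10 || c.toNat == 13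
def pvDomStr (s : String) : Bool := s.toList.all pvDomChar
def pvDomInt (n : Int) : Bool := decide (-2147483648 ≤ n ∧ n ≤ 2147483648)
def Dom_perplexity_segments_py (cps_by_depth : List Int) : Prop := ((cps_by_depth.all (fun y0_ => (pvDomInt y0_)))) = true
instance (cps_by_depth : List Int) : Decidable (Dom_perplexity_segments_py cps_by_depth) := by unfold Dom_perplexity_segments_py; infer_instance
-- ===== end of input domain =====

-- B replaces A's sign-bucketing + carry-forward pass + stateful prev/None scan
-- by an arithmetic formulation: 1 + number of adjacent negative-product pairs
-- among the non-zero entries (idiomatic, no sign buckets or run state).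


-- ===== PORT A =====
def signBucket (cp : Int) : Int :=
  if cp > 0 then 1 else if cp < 0 then -1 else 0

-- A's carry-forward loop: append `last` for zeros, else the sign (updating `last`)
def normLoop : List Int → Int → List Int
  | [], _ => []
  | s :: rest, last =>
      if s = 0 then last :: normLoop rest last else s :: normLoop rest s

-- A's segment-counting loop with state `prev : Option Int` and accumulator `seg`
def segLoop : List Int → Option Int → Int → Int
  | [], _, seg => seg
  | s :: rest, prev, seg =>
      if s = 0 then segLoop rest prev seg
      else if prev = none ∨ prev ≠ some s then segLoop rest (some s) (seg + 1)
      else segLoop rest prev seg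

def perplexity_segments_py (cps_by_depth : List Int) : Int :=
  let signs := cps_by_depth.map signBucket
  let norm := normLoop signs 0
  if norm.all (fun s => s = 0) then 1
  else max 1 (segLoop norm none 0)

-- ===== PORT B =====
-- sum(x*y < 0 for x, y in zip(nz, nz[1:]))
def crossSum : List (Int × Int) → Int
  | [] => 0
  | p :: ps => (if p.1 * p.2 < 0 then 1 else 0) + crossSum ps

def perplexity_segments_py_alt (cps_by_depth : List Int) : Int :=
  let nz := cps_by_depth.filter (fun cp => cp ≠ 0)
  1 + crossSum (nz.zip nz.tail)

-- ===== PRECONDITION & SPEC =====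
def Spec_perplexity_segments_py (cps_by_depth : List Int) (out : Int) : Prop := out = perplexity_segments_py_alt cps_by_depth
instance (cps_by_depth : List Int) (out : Int) : Decidable (Spec_perplexity_segments_py cps_by_depth out) := by unfold Spec_perplexity_segments_py; infer_instance

-- ===== CLAIM (what is proved, stated in full; the proofs are below) =====
def Claim_equal_perplexity_segments_py : Prop := ∀ (cps_by_depth : List Int), Dom_perplexity_segments_py cps_by_depth → Spec_perplexity_segments_py cps_by_depth (perplexity_segments_py cps_by_depth)

-- ===== LEMMAS AND PROOFS =====

-- proof helper: run count seeded with a previous value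
def runAux : Option Int → List Int → Int
  | _, [] => 0
  | prev, x :: xs => (if prev = some x then 0 else 1) + runAux (some x) xs

-- the carried values inserted by normLoop never change what segLoop computes
theorem segLoop_normLoop (signs : List Int) (last : Int) (prev : Option Int) (seg : Int)
    (h : last ≠ 0 → prev = some last) :
    segLoop (normLoop signs last) prev seg = segLoop signs prev seg := by
  induction signs generalizing last prev seg with
  | nil => rfl
  | cons s rest ih =>
    by_cases hs : s = 0
    · subst hs
      simp only [normLoop, segLoop, if_true]
      by_cases hl : last = 0
      · subst hl
        rw [if_pos rfl]
        exact ih 0 prev seg (fun h0 => absurd rfl h0)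
      · have hp := h hl
        subst hp
        rw [if_neg hl]
        have hnb : ¬ ((some last : Option Int) = none ∨ (some last : Option Int) ≠ some last) := by
          simp
        rw [if_neg hnb]
        exact ih last (some last) seg (fun _ => rfl)
    · simp only [normLoop, segLoop, if_neg hs]
      by_cases hb : prev = none ∨ prev ≠ some s
      · rw [if_pos hb, if_pos hb]
        exact ih s (some s) (seg + 1) (fun _ => rfl)
      · rw [if_neg hb, if_neg hb]
        rw [not_or, not_not] at hb
        exact ih s prev seg (fun _ => hb.2)

-- segLoop skips zeros; on what remains it counts runs starting from prev
theorem segLoop_eq_runAux (l : List Int) (prev : Option Int) (seg : Int) :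
    segLoop l prev seg = seg + runAux prev (l.filter (fun s => s ≠ 0)) := by
  induction l generalizing prev seg with
  | nil => simp [segLoop, runAux]
  | cons x xs ih =>
    by_cases hx : x = 0
    · subst hx
      simp only [segLoop, List.filter]
      simpa using ih prev seg
    · have hf : (x :: xs).filter (fun s => s ≠ 0) = x :: xs.filter (fun s => s ≠ 0) := by
        simp [List.filter, hx]
      rw [hf]
      simp only [segLoop, if_neg hx, runAux]
      by_cases hb : prev = none ∨ prev ≠ some x
      · have hne : prev ≠ some x := by
          rcases hb with h1 | h2
          · subst h1; simp
          · exact h2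
        rw [if_pos hb, if_neg hne, ih (some x) (seg + 1)]
        ring
      · rw [not_or, not_not] at hb
        have hnb : ¬ (prev = none ∨ prev ≠ some x) := by
          rw [not_or, not_not]; exact hb
        rw [if_neg hnb, if_pos hb.2, ih prev seg, hb.2]
        ring

theorem normLoop_all_zero (signs : List Int) :
    ((normLoop signs 0).all (fun s => decide (s = 0)))
      = (signs.all (fun s => decide (s = 0))) := by
  induction signs with
  | nil => rfl
  | cons s rest ih =>
    by_cases hs : s = 0
    · subst hs; simp [normLoop, ih]
    · simp [normLoop, hs]

theorem filter_map_signs (l : List Int) :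
    (l.map signBucket).filter (fun s => s ≠ 0)
      = (l.filter (fun cp => cp ≠ 0)).map signBucket := by
  induction l with
  | nil => rfl
  | cons x xs ih =>
    by_cases hx : x = 0
    · subst hx
      simpa [signBucket] using ih
    · have hb : signBucket x ≠ 0 := by
        unfold signBucket
        split_ifs <;> omega
      simpa [hx, hb] using ih

-- for non-zero x, y: equal sign buckets ⟺ non-negative product
theorem sb_eq_iff (x y : Int) (hx : x ≠ 0) (hy : y ≠ 0) :
    (signBucket x = signBucket y) ↔ ¬ (x * y < 0) := by
  rcases lt_or_gt_of_ne hx with hx' | hx' <;> rcases lt_or_gt_of_ne hy with hy' | hy'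
  · simp only [signBucket, if_neg (not_lt.mpr hx'.le), if_pos hx',
      if_neg (not_lt.mpr hy'.le), if_pos hy']
    have := mul_pos_of_neg_of_neg hx' hy'
    simp [not_lt.mpr this.le]
  · simp only [signBucket, if_neg (not_lt.mpr hx'.le), if_pos hx', if_pos hy']
    have := mul_neg_of_neg_of_pos hx' hy'
    constructor <;> intro <;> omega
  · simp only [signBucket, if_pos hx', if_neg (not_lt.mpr hy'.le), if_pos hy']
    have := mul_neg_of_pos_of_neg hx' hy'
    constructor <;> intro <;> omega
  · simp only [signBucket, if_pos hx', if_pos hy']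
    have := mul_pos hx' hy'
    simp [not_lt.mpr this.le]

-- seeded run count over sign buckets = crossing count over the raw values
theorem runAux_eq_crossSum (x : Int) (xs : List Int)
    (hx : x ≠ 0) (hxs : ∀ y ∈ xs, y ≠ 0) :
    runAux (some (signBucket x)) (xs.map signBucket)
      = crossSum ((x :: xs).zip xs) := by
  induction xs generalizing x with
  | nil => rfl
  | cons y rest ih =>
    have hy : y ≠ 0 := hxs y (List.mem_cons_self ..)
    have hrest : ∀ z ∈ rest, z ≠ 0 := fun z hz => hxs z (List.mem_cons_of_mem _ hz)
    simp only [List.map, runAux, List.zip_cons_cons, crossSum, Option.some.injEq]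
    rw [ih y hy hrest]
    by_cases hlt : x * y < 0
    · rw [if_neg ((not_iff_not.mpr (sb_eq_iff x y hx hy)).mpr (not_not_intro hlt)),
        if_pos hlt]
    · rw [if_pos ((sb_eq_iff x y hx hy).mpr hlt), if_neg hlt]

theorem crossSum_nonneg (l : List (Int × Int)) : 0 ≤ crossSum l := by
  induction l with
  | nil => simp [crossSum]
  | cons p ps ih =>
    simp only [crossSum]
    split_ifs <;> omega

theorem all_zero_filter (l : List Int) (h : ∀ s ∈ l, s = 0) :
    l.filter (fun s => s ≠ 0) = [] := by
  rw [List.filter_eq_nil_iff]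
  intro a ha
  simpa using h a ha

-- ===== VERDICT (by name: the statement is the Claim_ definition above) =====
theorem perplexity_segments_py_spec : Claim_equal_perplexity_segments_py := by
  intro cps _
  unfold Spec_perplexity_segments_py perplexity_segments_py perplexity_segments_py_alt
  simp only []
  set signs := cps.map signBucket with hsigns
  set nz := cps.filter (fun cp => cp ≠ 0) with hnz
  clear_value nz
  have hcore : segLoop (normLoop signs 0) none 0 = runAux none (nz.map signBucket) := by
    rw [segLoop_normLoop signs 0 none 0 (fun h => absurd rfl h),
        segLoop_eq_runAux, hsigns, filter_map_signs, ← hnz]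
    ring
  by_cases hz : (normLoop signs 0).all (fun s => s = 0)
  · rw [if_pos hz]
    have hz' : signs.all (fun s => decide (s = 0)) := by
      rw [← normLoop_all_zero]; simpa using hz
    have hfe : nz = [] := by
      rw [hnz]
      apply all_zero_filter
      intro s hs
      have hsb := List.all_eq_true.mp hz' (signBucket s) (by
        rw [hsigns]; exact List.mem_map_of_mem hs)
      have : signBucket s = 0 := by simpa using hsb
      unfold signBucket at this
      by_contra hne
      rcases lt_or_gt_of_ne hne with h' | h' <;> simp [not_lt.mpr h'.le, h'] at this
    rw [hfe]
    simp [crossSum]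
  · rw [if_neg hz, hcore]
    have hne : nz ≠ [] := by
      intro he
      apply hz
      rw [normLoop_all_zero]
      rw [List.all_eq_true]
      intro s hs
      rw [hsigns] at hs
      rcases List.mem_map.mp hs with ⟨c, hc, rfl⟩
      have hc0 : c = 0 := by
        by_contra hcc
        have : c ∈ nz := by
          rw [hnz, List.mem_filter]
          exact ⟨hc, by simpa using hcc⟩
        simp [he] at this
      subst hc0
      simp [signBucket]
    obtain ⟨x, xs, rfl⟩ := List.exists_cons_of_ne_nil hne
    have hmem : ∀ y ∈ (x :: xs), y ≠ 0 := by
      intro y hy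
      have : y ∈ cps.filter (fun cp => cp ≠ 0) := by rw [← hnz]; exact hy
      simpa using (List.mem_filter.mp this).2
    have hx : x ≠ 0 := hmem x (List.mem_cons_self ..)
    have hxs : ∀ y ∈ xs, y ≠ 0 := fun y hy => hmem y (List.mem_cons_of_mem _ hy)
    simp only [List.map, runAux, List.tail]
    rw [if_neg (by simp), runAux_eq_crossSum x xs hx hxs]
    have := crossSum_nonneg ((x :: xs).zip xs)
    omega
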